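-- pv_equiv track=rewrite | github.com/la-strole/Codewars | Simple Fun #87: Shuffled Array/shuffled_array.py | correct_mistake
-- ===== SOURCE A (Python) =====
-- def correct_mistake(shuffled_array: list) -> list:
--     """
--     find and rebove element wich is sum of array elements. return sorted array without sum
--     :param shuffled_array: array: list
--     :return: sorted array : list
--     """
--     assert isinstance(shuffled_array, list)
--     assert 2 <= len(shuffled_array) <= 30
--     for i in shuffled_array:
--         assert isinstance(i, int)
--         assert -300 <= i <= 300
--
--     for i in shuffled_array:
--         if i == sum(shuffled_array) - i:
--             return_array = shuffled_array.copy()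
--             return_array.remove(i)
--             return sorted(return_array)
-- ===== SOURCE B (Python) =====
-- def correct_mistake(shuffled_array: list) -> list:
--     """
--     find and rebove element wich is sum of array elements. return sorted array without sum
--     """
--     assert isinstance(shuffled_array, list)
--     assert 2 <= len(shuffled_array) <= 30
--     for i in shuffled_array:
--         assert isinstance(i, int)
--         assert -300 <= i <= 300
--
--     total = sum(shuffled_array)
--     if total % 2 == 0 and total // 2 in shuffled_array:
--         result = sorted(shuffled_array)
--         result.remove(total // 2)
--         return result
-- ===== Notes on version B (the rewrite author's own statement) =====
-- stated objective: simpler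
-- what changed: Instead of scanning for an element equal to the sum of the others (recomputing sum(...) per iteration), B computes the total once; the removable element must be total//2, so one parity test plus one membership test replaces the scan, and it removes the value from the already-sorted copy.
import Mathlib
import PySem

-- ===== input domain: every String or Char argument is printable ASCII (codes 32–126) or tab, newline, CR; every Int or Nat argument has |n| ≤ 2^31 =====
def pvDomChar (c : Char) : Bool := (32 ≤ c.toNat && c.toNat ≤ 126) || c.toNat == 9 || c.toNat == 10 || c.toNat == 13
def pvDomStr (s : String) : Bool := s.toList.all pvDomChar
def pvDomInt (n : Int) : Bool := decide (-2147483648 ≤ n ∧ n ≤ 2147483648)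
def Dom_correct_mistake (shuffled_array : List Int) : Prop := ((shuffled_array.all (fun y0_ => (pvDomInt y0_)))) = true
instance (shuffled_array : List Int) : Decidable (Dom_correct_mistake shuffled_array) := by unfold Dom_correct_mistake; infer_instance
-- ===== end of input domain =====

-- B replaces A's per-element scan (with sum recomputed each iteration) by one total, a parity
-- test and a membership test for total // 2, then removes that value from the sorted copy (simpler).


-- ===== PORT A =====
-- the 'for i in shuffled_array' scan; totality guard on remove? (i is always present)
def cmLoop (xs : List Int) : List Int → Option (List Int)
  | [] => none
  | i :: rest =>
    if i = xs.sum - i then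
      match PySem.List.remove? xs i with
      | some r => some (PySem.List.sorted r (fun x => x) false)
      | none => none
    else cmLoop xs rest

def correct_mistake (shuffled_array : List Int) : Option (List Int) :=
  cmLoop shuffled_array shuffled_array

-- ===== PORT B =====
def correct_mistake_alt (shuffled_array : List Int) : Option (List Int) :=
  let total := shuffled_array.sum
  if PySem.Int.mod total 2 = 0 ∧ PySem.Int.floordiv total 2 ∈ shuffled_array then
    match PySem.List.remove? (PySem.List.sorted shuffled_array (fun x => x) false)
        (PySem.Int.floordiv total 2) with
    | some r => some r
    | none => none
  else none

-- ===== PRECONDITION & SPEC =====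
-- Pre_ excludes exactly the inputs A's asserts reject (AssertionError): length outside 2..30
-- or an element outside -300..300.
def Pre_correct_mistake (shuffled_array : List Int) : Prop :=
  2 ≤ shuffled_array.length ∧ shuffled_array.length ≤ 30 ∧
    ∀ i ∈ shuffled_array, -300 ≤ i ∧ i ≤ 300
instance (shuffled_array : List Int) : Decidable (Pre_correct_mistake shuffled_array) := by
  unfold Pre_correct_mistake; infer_instance

def pvWitness_correct_mistake : List Int := [3, 1, 2]

def Spec_correct_mistake (shuffled_array : List Int) (out : Option (List Int)) : Prop := out = correct_mistake_alt shuffled_array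
instance (shuffled_array : List Int) (out : Option (List Int)) : Decidable (Spec_correct_mistake shuffled_array out) := by unfold Spec_correct_mistake; infer_instance

-- ===== CLAIM (what is proved, stated in full; the proofs are below) =====
def Claim_equal_correct_mistake : Prop := ∀ (shuffled_array : List Int), Dom_correct_mistake shuffled_array → Pre_correct_mistake shuffled_array → Spec_correct_mistake shuffled_array (correct_mistake shuffled_array)

-- ===== LEMMAS AND PROOFS =====

-- if some element of the scanned suffix satisfies the condition, A returns the branch value for
-- it (all satisfying elements carry the same value, so the first found one is as good as any)
theorem cmLoop_of_mem (xs : List Int) (l : List Int) (i : Int) (hi : i ∈ l)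
    (hc : i = xs.sum - i) :
    cmLoop xs l =
      match PySem.List.remove? xs i with
      | some r => some (PySem.List.sorted r (fun x => x) false)
      | none => none := by
  induction l with
  | nil => cases hi
  | cons j rest ih =>
    by_cases hj : j = xs.sum - j
    · have : j = i := by omega
      subst this
      simp only [cmLoop, if_pos hj]
    · have hi' : i ∈ rest := by
        cases List.mem_cons.mp hi with
        | inl h => exact absurd (h ▸ hc) hj
        | inr h => exact h
      simp only [cmLoop, if_neg hj]
      exact ih hi'

theorem cmLoop_none (xs : List Int) (l : List Int)
    (h : ∀ i ∈ l, ¬ i = xs.sum - i) : cmLoop xs l = none := by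
  induction l with
  | nil => rfl
  | cons j rest ih =>
    simp only [cmLoop, if_neg (h j (List.mem_cons_self))]
    exact ih (fun i hi => h i (List.mem_cons_of_mem _ hi))

-- sorting then erasing one occurrence of v = erasing then sorting
theorem sorted_erase (xs : List Int) (v : Int) :
    PySem.List.sorted (xs.erase v) (fun x => x) false =
      (PySem.List.sorted xs (fun x => x) false).erase v := by
  refine PySem.List.eq_of_perm_of_pairwise_le_of_injective (κ := Int) (fun x => x)
    (fun a b h => h) ?_ ?_ ?_
  · exact (PySem.List.sorted_perm (xs.erase v) (fun x => x) false).trans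
      ((PySem.List.sorted_perm xs (fun x => x) false).erase v).symm
  · exact PySem.List.sorted_pairwise (xs.erase v) (fun x => x)
  · exact (PySem.List.sorted_pairwise xs (fun x => x)).sublist (List.erase_sublist)

-- ===== VERDICT (by name: the statement is the Claim_ definition above) =====
theorem correct_mistake_spec : Claim_equal_correct_mistake := by
  intro xs _ _
  unfold Spec_correct_mistake correct_mistake
  have halt : correct_mistake_alt xs =
      if PySem.Int.mod xs.sum 2 = 0 ∧ PySem.Int.floordiv xs.sum 2 ∈ xs then
        match PySem.List.remove? (PySem.List.sorted xs (fun x => x) false)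
            (PySem.Int.floordiv xs.sum 2) with
        | some r => some r
        | none => none
      else none := rfl
  rw [halt]
  by_cases h : ∃ i ∈ xs, i = xs.sum - i
  · obtain ⟨i, hi, hc⟩ := h
    have htot : xs.sum = 2 * i := by omega
    have hmod : PySem.Int.mod xs.sum 2 = 0 :=
      (PySem.Int.mod_eq_zero_iff_dvd _ _).mpr ⟨i, htot⟩
    have hdiv : PySem.Int.floordiv xs.sum 2 = i := by
      rw [htot, PySem.Int.floordiv_eq_ediv_of_pos (by norm_num)]
      exact Int.mul_ediv_cancel_left i (by norm_num)
    rw [cmLoop_of_mem xs xs i hi hc]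
    rw [PySem.List.remove?_eq_some_erase xs i hi]
    have hmem : i ∈ PySem.List.sorted xs (fun x => x) false :=
      (PySem.List.mem_sorted xs (fun x => x) false i).mpr hi
    have hcond : PySem.Int.mod xs.sum 2 = 0 ∧ PySem.Int.floordiv xs.sum 2 ∈ xs :=
      ⟨hmod, hdiv ▸ hi⟩
    rw [if_pos hcond, hdiv, PySem.List.remove?_eq_some_erase _ i hmem]
    exact congrArg some (sorted_erase xs i)
  · rw [cmLoop_none xs xs (fun i hi hc => h ⟨i, hi, hc⟩)]
    have : ¬ (PySem.Int.mod xs.sum 2 = 0 ∧ PySem.Int.floordiv xs.sum 2 ∈ xs) := by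
      rintro ⟨hmod, hmem⟩
      obtain ⟨c, hc⟩ := (PySem.Int.mod_eq_zero_iff_dvd _ _).mp hmod
      have hdiv : PySem.Int.floordiv xs.sum 2 = c := by
        rw [hc, PySem.Int.floordiv_eq_ediv_of_pos (by norm_num)]
        exact Int.mul_ediv_cancel_left c (by norm_num)
      exact h ⟨c, hdiv ▸ hmem, by omega⟩
    rw [if_neg this]
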